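-- pv_equiv track=rewrite | github.com/geraint36/SublimeVBScriptLibraries | VBScriptLibraryUtil/ImportDetails.py | seperateLineIntoCodeAndComment
-- ===== SOURCE A (Python) =====
-- def seperateLineIntoCodeAndComment(line):
-- 	inStr = False
-- 	pos = 0
-- 	for char in line:
-- 		if char == '"':
-- 			inStr = not inStr
-- 		# exit loop when comment starts
-- 		elif (not inStr) and (char == "'"):
-- 			break
--
-- 		pos += 1
--
-- 	codeLines = splitMultiLineCode(line[:pos])
-- 	if (len(line) == pos):
-- 		comment = None
-- 	else:
-- 		comment = line[pos:].strip()
-- 	return codeLines, comment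
--
-- def splitMultiLineCode(line):
-- 	lines = []
-- 	inStr = False
-- 	pos = 0
-- 	lastPos = 0
-- 	for char in line:
-- 		if char == '"':
-- 			inStr = not inStr
-- 		# exit loop when comment starts
-- 		elif (not inStr) and (char == ":"):
-- 			lines.append(line[lastPos:pos].strip())
-- 			lastPos = pos + 1
--
-- 		pos += 1
--
-- 	# incase of empty line
-- 	if len(line) > lastPos:
-- 		lines.append(line[lastPos:].strip())
-- 	return lines
-- ===== SOURCE B (Python) =====
-- def seperateLineIntoCodeAndComment(line):
-- 	# Single fused pass: split on unquoted ':' and capture the comment in one loop.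
-- 	segments = []
-- 	comment = None
-- 	inStr = False
-- 	lastPos = 0
-- 	codeLen = len(line)
-- 	for pos, char in enumerate(line):
-- 		if char == '"':
-- 			inStr = not inStr
-- 		elif not inStr:
-- 			if char == ':':
-- 				segments.append(line[lastPos:pos].strip())
-- 				lastPos = pos + 1
-- 			elif char == "'":
-- 				comment = line[pos:].strip()
-- 				codeLen = pos
-- 				break
-- 	if codeLen > lastPos:
-- 		segments.append(line[lastPos:codeLen].strip())
-- 	return segments, comment
-- ===== Notes on version B (the rewrite author's own statement) =====
-- stated objective: alternative
-- what changed: A scans the line once to find where the comment starts and then re-scans the code prefix in a separate helper to split it on unquoted colons; B fuses both into a single pass that splits and captures the comment in one loop.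
import Mathlib
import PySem

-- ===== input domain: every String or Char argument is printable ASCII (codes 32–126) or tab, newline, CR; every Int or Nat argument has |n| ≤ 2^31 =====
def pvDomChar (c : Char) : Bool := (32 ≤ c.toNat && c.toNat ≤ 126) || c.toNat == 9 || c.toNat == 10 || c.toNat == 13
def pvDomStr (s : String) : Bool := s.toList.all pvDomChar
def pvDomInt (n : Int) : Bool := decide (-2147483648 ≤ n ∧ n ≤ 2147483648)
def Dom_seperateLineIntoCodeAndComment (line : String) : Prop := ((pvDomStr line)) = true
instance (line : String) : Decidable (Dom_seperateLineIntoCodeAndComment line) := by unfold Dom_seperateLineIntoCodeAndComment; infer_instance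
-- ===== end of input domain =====

-- B fuses A's two scans (comment-finding loop + splitMultiLineCode) into one pass; same value, single traversal.

-- ===== PORT A =====
-- A's first loop: position of the first unquoted '\'' (or len(line) if none); pos counter as in the Python.
def pvCommentPos : List Char → Bool → Nat → Nat
  | [], _, pos => pos
  | c :: r, inStr, pos =>
    if c = '"' then pvCommentPos r (!inStr) (pos + 1)
    else if !inStr && c = '\'' then pos
    else pvCommentPos r inStr (pos + 1)

-- splitMultiLineCode's loop over `l` (the slice line[:pos]); returns (lines, lastPos).
def pvSplitLoop (l : List Char) : List Char → Bool → Nat → Nat → List (List Char) → List (List Char) × Nat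
  | [], _, _, lastPos, lines => (lines, lastPos)
  | c :: r, inStr, pos, lastPos, lines =>
    if c = '"' then pvSplitLoop l r (!inStr) (pos + 1) lastPos lines
    else if !inStr && c = ':' then
      pvSplitLoop l r inStr (pos + 1) (pos + 1)
        (lines ++ [PySem.Chars.strip (PySem.List.slice l (some (lastPos : Int)) (some (pos : Int)))])
    else pvSplitLoop l r inStr (pos + 1) lastPos lines

def splitMultiLineCode (l : List Char) : List (List Char) :=
  let res := pvSplitLoop l l false 0 0 []   -- res = (lines, lastPos)
  if l.length > res.2 then res.1 ++ [PySem.Chars.strip (PySem.List.slice l (some (res.2 : Int)) none)]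
  else res.1

def seperateLineIntoCodeAndComment (line : String) : List String × Option String :=
  let l := line.toList
  let pos := pvCommentPos l false 0
  let codeLines := (splitMultiLineCode (PySem.List.slice l none (some (pos : Int)))).map String.ofList
  let comment : Option String :=
    if l.length = pos then none
    else some (String.ofList (PySem.Chars.strip (PySem.List.slice l (some (pos : Int)) none)))
  (codeLines, comment)

-- ===== PORT B =====
-- B's single fused loop over the full line; returns (segments, comment, codeLen, lastPos).
def pvAltLoop (l : List Char) : List Char → Bool → Nat → Nat → List (List Char) →
    List (List Char) × Option (List Char) × Nat × Nat
  | [], _, _, lastPos, segs => (segs, none, l.length, lastPos)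
  | c :: r, inStr, pos, lastPos, segs =>
    if c = '"' then pvAltLoop l r (!inStr) (pos + 1) lastPos segs
    else if !inStr then
      if c = ':' then
        pvAltLoop l r inStr (pos + 1) (pos + 1)
          (segs ++ [PySem.Chars.strip (PySem.List.slice l (some (lastPos : Int)) (some (pos : Int)))])
      else if c = '\'' then
        (segs, some (PySem.Chars.strip (PySem.List.slice l (some (pos : Int)) none)), pos, lastPos)
      else pvAltLoop l r inStr (pos + 1) lastPos segs
    else pvAltLoop l r inStr (pos + 1) lastPos segs

def seperateLineIntoCodeAndComment_alt (line : String) : List String × Option String :=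
  let l := line.toList
  let res := pvAltLoop l l false 0 0 []   -- res = (segs, comment, codeLen, lastPos)
  let segs :=
    if res.2.2.1 > res.2.2.2 then
      res.1 ++ [PySem.Chars.strip (PySem.List.slice l (some (res.2.2.2 : Int)) (some (res.2.2.1 : Int)))]
    else res.1
  (segs.map String.ofList, res.2.1.map String.ofList)

-- ===== PRECONDITION & SPEC =====
def Spec_seperateLineIntoCodeAndComment (line : String) (out : List String × Option String) : Prop := out = seperateLineIntoCodeAndComment_alt line
instance (line : String) (out : List String × Option String) : Decidable (Spec_seperateLineIntoCodeAndComment line out) := by unfold Spec_seperateLineIntoCodeAndComment; infer_instance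

-- ===== CLAIM (what is proved, stated in full; the proofs are below) =====
def Claim_equal_seperateLineIntoCodeAndComment : Prop := ∀ (line : String), Dom_seperateLineIntoCodeAndComment line → Spec_seperateLineIntoCodeAndComment line (seperateLineIntoCodeAndComment line)

-- ===== LEMMAS AND PROOFS =====

theorem pvCommentPos_le (r : List Char) (s : Bool) (pos : Nat) : pos ≤ pvCommentPos r s pos := by
  induction r generalizing s pos with
  | nil => simp [pvCommentPos]
  | cons c r ih =>
    simp only [pvCommentPos]
    split_ifs with h1 h2
    · exact le_trans (Nat.le_succ _) (ih _ _)
    · exact le_refl _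
    · exact le_trans (Nat.le_succ _) (ih _ _)

theorem pvCommentPos_le_len (r : List Char) (s : Bool) (pos : Nat) :
    pvCommentPos r s pos ≤ pos + r.length := by
  induction r generalizing s pos with
  | nil => simp [pvCommentPos]
  | cons c r ih =>
    simp only [pvCommentPos, List.length_cons]
    split_ifs with h1 h2
    · exact le_trans (ih _ _) (by omega)
    · omega
    · exact le_trans (ih _ _) (by omega)

-- slices of the prefix l.take p agree with slices of l below p
theorem slice_take (l : List Char) (p a b : Nat) (hb : b ≤ p) :
    PySem.List.slice (l.take p) (some (a : Int)) (some (b : Int)) =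
    PySem.List.slice l (some (a : Int)) (some (b : Int)) := by
  rw [PySem.List.slice_natCast, PySem.List.slice_natCast]
  rw [List.drop_take]
  rw [List.take_take]
  congr 1
  omega

-- MAIN: B's fused loop equals A's split loop on the prefix, plus the comment data.
theorem pvMain (l : List Char) (p : Nat) (hp : p ≤ l.length) :
    ∀ (pos : Nat) (inStr : Bool) (lastPos : Nat) (segs : List (List Char)),
      pos ≤ p →
      pvCommentPos (l.drop pos) inStr pos = p →
      pvAltLoop l (l.drop pos) inStr pos lastPos segs =
        ((pvSplitLoop (l.take p) ((l.take p).drop pos) inStr pos lastPos segs).1,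
         (if l.length = p then none else some (PySem.Chars.strip (PySem.List.slice l (some (p : Int)) none))),
         p,
         (pvSplitLoop (l.take p) ((l.take p).drop pos) inStr pos lastPos segs).2) := by
  intro pos inStr lastPos segs hle hbrk
  induction hn : p - pos generalizing pos inStr lastPos segs with
  | zero =>
    have hpp : pos = p := by omega
    subst hpp
    rw [List.drop_take, Nat.sub_self, List.take_zero]
    by_cases hend : pos = l.length
    · rw [hend]
      rw [List.drop_length]
      simp [pvAltLoop, pvSplitLoop]
    · have hlt : pos < l.length := by omega
      obtain ⟨c, r, hdrop⟩ : ∃ c r, l.drop pos = c :: r := by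
        cases h : l.drop pos with
        | nil => exfalso; have := List.length_drop (l := l) (i := pos); rw [h] at this; simp at this; omega
        | cons c r => exact ⟨c, r, rfl⟩
      rw [hdrop] at hbrk ⊢
      -- from hbrk, the head must be an unquoted quote
      have hc : inStr = false ∧ c = '\'' := by
        by_contra hcontra
        simp only [pvCommentPos] at hbrk
        split_ifs at hbrk with h1 h2
        · have := pvCommentPos_le r (!inStr) (pos + 1); omega
        · simp only [Bool.and_eq_true, Bool.not_eq_true', decide_eq_true_eq] at h2
          exact hcontra ⟨h2.1, h2.2⟩
        · have := pvCommentPos_le r inStr (pos + 1); omega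
      obtain ⟨hs, hq⟩ := hc
      subst hs hq
      have hne : ¬ l.length = pos := by omega
      simp [pvAltLoop, pvSplitLoop, hne]
  | succ n ih =>
    have hlt : pos < p := by omega
    have hlen : pos < l.length := by omega
    obtain ⟨c, r, hdrop⟩ : ∃ c r, l.drop pos = c :: r := by
      cases h : l.drop pos with
      | nil => exfalso; have := List.length_drop (l := l) (i := pos); rw [h] at this; simp at this; omega
      | cons c r => exact ⟨c, r, rfl⟩
    have hr : r = l.drop (pos + 1) := by
      have := congrArg List.tail hdrop
      simpa [List.tail_drop] using this.symm
    have hcget : l[pos] = c := by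
      have h2 : l[pos]? = some c := by
        have := congrArg (fun t => t.head?) hdrop
        simpa [List.head?_drop] using this
      rw [List.getElem?_eq_getElem hlen] at h2
      exact Option.some.inj h2
    -- the prefix has the same head at pos
    have hdropTake : (l.take p).drop pos = c :: (l.take p).drop (pos + 1) := by
      have h1 : pos < (l.take p).length := by simp [List.length_take]; omega
      rw [List.drop_eq_getElem_cons h1]
      congr 1
      rw [List.getElem_take]
      exact hcget
    rw [hdrop, hdropTake]
    rw [hdrop] at hbrk
    by_cases h1 : c = '"'
    · subst h1
      simp only [pvCommentPos] at hbrk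
      rw [hr] at hbrk
      simp only [pvAltLoop, pvSplitLoop]
      rw [hr]
      exact ih (pos + 1) (!inStr) lastPos segs (by omega) hbrk (by omega)
    · by_cases hs : inStr
      · subst hs
        simp only [pvCommentPos, pvAltLoop, pvSplitLoop, h1, if_false, Bool.not_true,
          Bool.false_and, if_neg (Bool.false_ne_true)] at hbrk ⊢
        rw [hr] at hbrk
        rw [hr]
        exact ih (pos + 1) true lastPos segs (by omega) hbrk (by omega)
      · simp only [Bool.not_eq_true] at hs
        subst hs
        have hq : c ≠ '\'' := by
          intro hq
          simp [pvCommentPos, hq] at hbrk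
          omega
        by_cases hcol : c = ':'
        · subst hcol
          simp only [pvCommentPos, pvAltLoop, pvSplitLoop, if_neg h1, Bool.not_false,
            Bool.true_and] at hbrk ⊢
          rw [hr] at hbrk
          rw [hr, slice_take l p lastPos pos (by omega)]
          exact ih (pos + 1) false (pos + 1) _ (by omega) hbrk (by omega)
        · simp only [pvCommentPos, pvAltLoop, pvSplitLoop, if_neg h1, Bool.not_false,
            Bool.true_and, hq, hcol, decide_false, if_false, Bool.true_and] at hbrk ⊢
          rw [hr] at hbrk
          rw [hr]
          exact ih (pos + 1) false lastPos segs (by omega) hbrk (by omega)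

-- ===== VERDICT (by name: the statement is the Claim_ definition above) =====
theorem seperateLineIntoCodeAndComment_spec : Claim_equal_seperateLineIntoCodeAndComment := by
  unfold Claim_equal_seperateLineIntoCodeAndComment Spec_seperateLineIntoCodeAndComment
  intro line _
  simp only [seperateLineIntoCodeAndComment, seperateLineIntoCodeAndComment_alt, splitMultiLineCode]
  set l := line.toList with hl
  set p := pvCommentPos l false 0 with hpdef
  have hp : p ≤ l.length := by simpa using pvCommentPos_le_len l false 0
  have hmain := pvMain l p hp 0 false 0 [] (by omega) (by simp [hpdef])
  simp only [List.drop_zero] at hmain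
  rw [hmain]
  rw [PySem.List.slice_to_natCast]
  have hlen : (l.take p).length = p := by simp [List.length_take]; omega
  simp only [hlen]
  set S := pvSplitLoop (l.take p) (l.take p) false 0 0 [] with hS
  by_cases htr : p > S.2
  · rw [if_pos htr, if_pos htr]
    rw [PySem.List.slice_from_natCast, PySem.List.slice_natCast, List.drop_take]
    by_cases hc : l.length = p <;> simp [hc]
  · rw [if_neg htr, if_neg htr]
    by_cases hc : l.length = p <;> simp [hc]
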